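-- pv_equiv track=rewrite | github.com/ramchawla/ram | parsing/parse_numeric.py | format_whitespace
-- ===== SOURCE A (Python) =====
-- OPERATORS = ('+', '-', '/', '*', 'not', 'or', 'and')
--
-- def format_whitespace(text: str) -> str:
--     """ Insert whitespace around operators.
--
--     >>> format_whitespace('(7/(4 +1)- 15)')
--     '(7 / (4 + 1) - 15)'
--     """
--     new_text = ''
--
--     for char in text.replace(' ', ''):
--         if char in OPERATORS:
--             new_text += f' {char} '
--         else:
--             new_text += char
--
--     return new_text
-- ===== SOURCE B (Python) =====
-- OPERATORS = ('+', '-', '/', '*', 'not', 'or', 'and')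
--
-- def format_whitespace(text: str) -> str:
--     """Insert whitespace around operators via whole-string replacement passes."""
--     result = text.replace(' ', '')
--     for op in '+-/*':
--         result = result.replace(op, f' {op} ')
--     return result
-- ===== Notes on version B (the rewrite author's own statement) =====
-- stated objective: faster
-- what changed: Replaces A's char-by-char loop with per-character string concatenation by one whole-string replace pass per operator ('+', '-', '/', '*') after the same space-stripping replace.
import Mathlib
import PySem

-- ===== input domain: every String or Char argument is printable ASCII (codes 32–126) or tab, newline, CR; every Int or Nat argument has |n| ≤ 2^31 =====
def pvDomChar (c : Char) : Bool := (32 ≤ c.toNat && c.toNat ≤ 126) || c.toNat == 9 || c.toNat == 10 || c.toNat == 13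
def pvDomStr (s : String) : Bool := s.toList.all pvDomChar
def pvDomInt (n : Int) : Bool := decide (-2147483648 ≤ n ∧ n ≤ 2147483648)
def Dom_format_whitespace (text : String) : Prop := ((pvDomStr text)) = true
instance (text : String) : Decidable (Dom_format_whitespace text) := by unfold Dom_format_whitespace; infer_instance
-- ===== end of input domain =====

-- B replaces A's char-by-char loop (with string concatenation) by one whole-string
-- replace pass per single-character operator; same return value, no side effects.

-- ===== PORT A =====
def pvOPERATORS : List String := ["+", "-", "/", "*", "not", "or", "and"]

def format_whitespace (text : String) : String :=
  (PySem.Str.replace text " " "").toList.foldl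
    (fun acc c =>
      if pvOPERATORS.contains (String.singleton c) then
        acc ++ " " ++ String.singleton c ++ " "
      else
        acc ++ String.singleton c) ""

-- ===== PORT B =====
def format_whitespace_alt (text : String) : String :=
  "+-/*".toList.foldl
    (fun s op => PySem.Str.replace s (String.singleton op) (" " ++ String.singleton op ++ " "))
    (PySem.Str.replace text " " "")

-- ===== PRECONDITION & SPEC =====
def Spec_format_whitespace (text : String) (out : String) : Prop := out = format_whitespace_alt text
instance (text : String) (out : String) : Decidable (Spec_format_whitespace text out) := by unfold Spec_format_whitespace; infer_instance

-- ===== CLAIM (what is proved, stated in full; the proofs are below) =====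
def Claim_equal_format_whitespace : Prop := ∀ (text : String), Dom_format_whitespace text → Spec_format_whitespace text (format_whitespace text)

-- ===== LEMMAS AND PROOFS =====

-- replace.go with a single-character pattern is a per-character substitution
theorem pv_go_single (op : Char) (new : List Char) :
    ∀ (l : List Char) (fuel : Nat) (acc : List Char), l.length ≤ fuel →
      PySem.Chars.replace.go [op] new fuel l acc =
        acc.reverse ++ l.flatMap (fun c => if c = op then new else [c]) := by
  intro l
  induction l with
  | nil =>
      intro fuel acc _
      cases fuel <;> simp [PySem.Chars.replace.go]
  | cons c t ih =>
      intro fuel acc hf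
      cases fuel with
      | zero => simp at hf
      | succ fuel =>
        by_cases h : c = op
        · subst h
          have hpre : List.isPrefixOf [c] (c :: t) = true := by
            simp [List.isPrefixOf]
          rw [PySem.Chars.replace.go]
          simp only [hpre, if_true, List.length_cons, List.length_nil, List.drop_succ_cons,
            List.drop_zero]
          rw [ih fuel (new.reverse ++ acc) (by simpa using Nat.le_of_succ_le_succ hf)]
          simp
        · have hpre : List.isPrefixOf [op] (c :: t) = false := by
            simp only [List.isPrefixOf, Bool.and_eq_false_iff, beq_eq_false_iff_ne, ne_eq]
            exact Or.inl fun hh => h hh.symm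
          rw [PySem.Chars.replace.go]
          simp only [hpre]
          rw [ih fuel (c :: acc) (by simpa using Nat.le_of_succ_le_succ hf)]
          simp [h]

theorem pv_replace_single (s : List Char) (op : Char) (new : List Char) :
    PySem.Chars.replace s [op] new = s.flatMap (fun c => if c = op then new else [c]) := by
  rw [PySem.Chars.replace]
  simp only [List.isEmpty_cons, Bool.false_eq_true, if_false]
  simpa using pv_go_single op new s s.length [] (le_refl _)

-- A's accumulating loop, characterised
theorem pv_foldA (g : Char → String) :
    ∀ (cs : List Char) (acc : String),
      (cs.foldl (fun a c => a ++ g c) acc).toList = acc.toList ++ cs.flatMap (fun c => (g c).toList) := by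
  intro cs
  induction cs with
  | nil => intro acc; simp
  | cons c t ih => intro acc; simp [List.foldl, ih]

theorem pv_singleton_eq (c : Char) (s : String) :
    (String.singleton c = s) ↔ ([c] = s.toList) := by
  rw [← String.toList_inj]; simp [String.singleton]

theorem pv_memA_iff (c : Char) :
    pvOPERATORS.contains (String.singleton c) = decide (c ∈ (['+', '-', '/', '*'] : List Char)) := by
  simp only [pvOPERATORS, List.contains_eq_mem, decide_eq_decide, List.mem_cons,
    List.not_mem_nil, or_false, pv_singleton_eq]
  simp

theorem pv_subst_chain (c : Char) :
    ((fun c => if c = '+' then [' ', '+', ' '] else [c]) c).flatMap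
      (fun c => ((fun c => if c = '-' then [' ', '-', ' '] else [c]) c).flatMap
        (fun c => ((fun c => if c = '/' then [' ', '/', ' '] else [c]) c).flatMap
          (fun c => if c = '*' then [' ', '*', ' '] else [c]))) =
    (if pvOPERATORS.contains (String.singleton c) then [' ', c, ' '] else [c]) := by
  rw [pv_memA_iff c]
  by_cases h1 : c = '+' <;> by_cases h2 : c = '-' <;> by_cases h3 : c = '/' <;>
    by_cases h4 : c = '*' <;>
    simp_all [List.flatMap]

theorem format_whitespace_eq (text : String) :
    format_whitespace text = format_whitespace_alt text := by
  rw [← String.toList_inj]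
  have hA : format_whitespace text =
      (PySem.Str.replace text " " "").toList.foldl
        (fun acc c => acc ++
          (if pvOPERATORS.contains (String.singleton c) then
            " " ++ String.singleton c ++ " " else String.singleton c)) "" := by
    unfold format_whitespace
    congr 1
    funext a c
    by_cases h : pvOPERATORS.contains (String.singleton c)
    · simp only [h, if_true]
      rw [← String.toList_inj]; simp [String.singleton]
    · simp only [h, Bool.false_eq_true, if_false]
  rw [hA, pv_foldA]
  unfold format_whitespace_alt
  rw [show "+-/*".toList = ['+', '-', '/', '*'] from rfl]
  simp only [List.foldl_cons, List.foldl_nil, PySem.Str.toList_replace,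
    show ∀ c : Char, (String.singleton c).toList = [c] from fun c => by simp [String.singleton],
    show ∀ c : Char, (" " ++ String.singleton c ++ " ").toList = [' ', c, ' '] from fun c => by
      simp [String.singleton]]
  generalize PySem.Chars.replace text.toList " ".toList "".toList = l
  rw [pv_replace_single, pv_replace_single, pv_replace_single, pv_replace_single,
    List.flatMap_assoc, List.flatMap_assoc, List.flatMap_assoc]
  simp only [String.toList_empty, List.nil_append, apply_ite String.toList,
    show ∀ c : Char, (String.singleton c).toList = [c] from fun c => by simp [String.singleton],
    show ∀ c : Char, (" " ++ String.singleton c ++ " ").toList = [' ', c, ' '] from fun c => by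
      simp [String.singleton]]
  exact List.flatMap_congr fun c _ => (pv_subst_chain c).symm

-- ===== VERDICT (by name: the statement is the Claim_ definition above) =====
theorem format_whitespace_spec : Claim_equal_format_whitespace := by
  intro text _
  exact format_whitespace_eq text
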